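-- pv_equiv track=rewrite | github.com/ARozental/agent2 | prepare_dataset.py | max_lengths
-- ===== SOURCE A (Python) =====
-- def max_lengths(book):
--   #max length for a book: 2 dataset examples of short books: ([21, 52, 9, 135, 15, 1], [21, 57, 11, 182, 12, 1])
--   chapters = book
--   l1 = len(chapters)
--   l2 = max([len(x) for x in chapters])
--   paragraphs = [item for sublist in chapters for item in sublist]
--   l3 = max([len(x) for x in paragraphs])
--   sentences = [item for sublist in paragraphs for item in sublist]
--   l4 = max([len(x) for x in sentences])
--   words = [item for sublist in sentences for item in sublist]
--   l5 = max([len(x) for x in words])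
--   return [l5, l4, l3, l2, l1, 1]
-- ===== SOURCE B (Python) =====
-- def max_lengths(book):
--     m = [None] * 5
--     def visit(node, d):
--         if m[d] is None or len(node) > m[d]:
--             m[d] = len(node)
--         if d < 4:
--             for child in node:
--                 visit(child, d + 1)
--     visit(book, 0)
--     if any(m[d] is None for d in range(1, 5)):
--         raise ValueError("empty level in book structure")
--     return [m[4], m[3], m[2], m[1], m[0], 1]
-- ===== Notes on version B (the rewrite author's own statement) =====
-- stated objective: alternative
-- what changed: Replaces the four materialized flatten passes (paragraphs/sentences/words lists plus a max over a mapped list per level) with one recursive descent over the nested structure that updates a per-depth running-maximum accumulator, raising ValueError exactly where A raises on an empty level.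
import Mathlib
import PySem

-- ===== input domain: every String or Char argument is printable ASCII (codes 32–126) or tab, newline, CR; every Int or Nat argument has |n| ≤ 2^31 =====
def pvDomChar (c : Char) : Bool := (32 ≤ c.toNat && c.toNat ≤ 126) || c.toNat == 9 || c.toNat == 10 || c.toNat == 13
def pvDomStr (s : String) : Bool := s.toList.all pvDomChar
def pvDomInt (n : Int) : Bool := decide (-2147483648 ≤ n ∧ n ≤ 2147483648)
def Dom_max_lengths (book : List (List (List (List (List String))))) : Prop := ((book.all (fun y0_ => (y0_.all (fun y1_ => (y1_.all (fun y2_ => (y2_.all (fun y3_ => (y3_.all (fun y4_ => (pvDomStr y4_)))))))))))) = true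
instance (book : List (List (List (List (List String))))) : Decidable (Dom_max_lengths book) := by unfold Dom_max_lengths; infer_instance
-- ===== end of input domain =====

-- B replaces A's four flatten+max passes by one recursive descent with per-depth running maxima (alternative decomposition, same cost class).

-- ===== PORT A =====
-- A: four flatten passes, each followed by max over the mapped lengths; max of an empty level raises, so the port pattern-matches on the Option results.
def max_lengths (book : List (List (List (List (List String))))) : List Int :=
  let chapters := book
  let l1 : Int := chapters.length
  let paragraphs := chapters.flatten
  let sentences := paragraphs.flatten
  let words := sentences.flatten
  match PySem.List.max? (chapters.map (fun x => (x.length : Int))) (fun y => y),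
        PySem.List.max? (paragraphs.map (fun x => (x.length : Int))) (fun y => y),
        PySem.List.max? (sentences.map (fun x => (x.length : Int))) (fun y => y),
        PySem.List.max? (words.map (fun x => (x.length : Int))) (fun y => y) with
  | some l2, some l3, some l4, some l5 => [l5, l4, l3, l2, l1, 1]
  | _, _, _, _ => []   -- unreachable under Pre_ (Python raises ValueError here)

-- ===== PORT B =====
-- state (m0, m1, m2, m3, m4): running maximum of node lengths seen at each depth (none = no node seen yet)
def pvSt := Option Int × Option Int × Option Int × Option Int × Option Int

def pvUpd (m : Option Int) (n : Int) : Option Int :=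
  match m with
  | none => some n
  | some v => if n > v then some n else some v

def pvVisit4 (w : List String) (m : pvSt) : pvSt :=
  (m.1, m.2.1, m.2.2.1, m.2.2.2.1, pvUpd m.2.2.2.2 (w.length : Int))

def pvVisit3 (s : List (List String)) (m : pvSt) : pvSt :=
  s.foldl (fun a w => pvVisit4 w a)
    (m.1, m.2.1, m.2.2.1, pvUpd m.2.2.2.1 (s.length : Int), m.2.2.2.2)

def pvVisit2 (p : List (List (List String))) (m : pvSt) : pvSt :=
  p.foldl (fun a s => pvVisit3 s a)
    (m.1, m.2.1, pvUpd m.2.2.1 (p.length : Int), m.2.2.2.1, m.2.2.2.2)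

def pvVisit1 (c : List (List (List (List String)))) (m : pvSt) : pvSt :=
  c.foldl (fun a p => pvVisit2 p a)
    (m.1, pvUpd m.2.1 (c.length : Int), m.2.2.1, m.2.2.2.1, m.2.2.2.2)

def pvVisit0 (b : List (List (List (List (List String))))) (m : pvSt) : pvSt :=
  b.foldl (fun a c => pvVisit1 c a)
    (pvUpd m.1 (b.length : Int), m.2.1, m.2.2.1, m.2.2.2.1, m.2.2.2.2)

def max_lengths_alt (book : List (List (List (List (List String))))) : List Int :=
  let m := pvVisit0 book (none, none, none, none, none)
  -- Python: if any(m[d] is None for d in range(1,5)): raise ValueError  (unreachable under Pre_, port returns [])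
  if m.2.1.isSome && m.2.2.1.isSome && m.2.2.2.1.isSome && m.2.2.2.2.isSome then
    [m.2.2.2.2.getD 0, m.2.2.2.1.getD 0, m.2.2.1.getD 0, m.2.1.getD 0, m.1.getD 0, 1]
  else []

-- ===== PRECONDITION & SPEC =====
-- Pre_ excludes exactly the inputs on which A raises ValueError (a max over an empty flattened level); B raises there too.
def Pre_max_lengths (book : List (List (List (List (List String))))) : Prop :=
  book ≠ [] ∧ book.flatten ≠ [] ∧ book.flatten.flatten ≠ [] ∧ book.flatten.flatten.flatten ≠ []
instance (book : List (List (List (List (List String))))) : Decidable (Pre_max_lengths book) := by unfold Pre_max_lengths; infer_instance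
def pvWitness_max_lengths : List (List (List (List (List String)))) := [[[[["a"]]]]]
def Spec_max_lengths (book : List (List (List (List (List String))))) (out : List Int) : Prop := out = max_lengths_alt book
instance (book : List (List (List (List (List String))))) (out : List Int) : Decidable (Spec_max_lengths book out) := by unfold Spec_max_lengths; infer_instance

-- ===== CLAIM (what is proved, stated in full; the proofs are below) =====
def Claim_equal_max_lengths : Prop := ∀ (book : List (List (List (List (List String))))), Dom_max_lengths book → Pre_max_lengths book → Spec_max_lengths book (max_lengths book)

-- ===== LEMMAS AND PROOFS =====

theorem pvUpd_some (v n : Int) : pvUpd (some v) n = some (max v n) := by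
  show (if n > v then some n else some v) = some (max v n)
  rcases lt_or_ge v n with h | h
  · rw [if_pos h, max_eq_right h.le]
  · rw [if_neg (not_lt.mpr h), max_eq_left h]

theorem foldl_pvUpd_some (t : List Int) (x : Int) :
    t.foldl pvUpd (some x) = some (t.foldl max x) := by
  induction t generalizing x with
  | nil => rfl
  | cons a t ih => simp [List.foldl_cons, pvUpd_some, ih]

theorem foldl_pvUpd_none (x : Int) (t : List Int) :
    (x :: t).foldl pvUpd none = some (t.foldl max x) := by
  simp [List.foldl_cons, pvUpd, foldl_pvUpd_some]

theorem foldl_pvVisit4 (s : List (List String)) (m : pvSt) :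
    s.foldl (fun a w => pvVisit4 w a) m = (m.1, m.2.1, m.2.2.1, m.2.2.2.1,
      (s.map (fun x => (x.length : Int))).foldl pvUpd m.2.2.2.2) := by
  induction s generalizing m with
  | nil => rfl
  | cons w s ih => rw [List.foldl_cons, ih]; simp [pvVisit4]

theorem pvVisit3_eq (s : List (List String)) (m : pvSt) :
    pvVisit3 s m = (m.1, m.2.1, m.2.2.1, pvUpd m.2.2.2.1 (s.length : Int),
      (s.map (fun x => (x.length : Int))).foldl pvUpd m.2.2.2.2) := by
  unfold pvVisit3
  rw [foldl_pvVisit4]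

theorem foldl_pvVisit3 (p : List (List (List String))) (m : pvSt) :
    p.foldl (fun a s => pvVisit3 s a) m = (m.1, m.2.1, m.2.2.1,
      (p.map (fun x => (x.length : Int))).foldl pvUpd m.2.2.2.1,
      (p.flatten.map (fun x => (x.length : Int))).foldl pvUpd m.2.2.2.2) := by
  induction p generalizing m with
  | nil => rfl
  | cons s p ih => rw [List.foldl_cons, ih, pvVisit3_eq]; simp [List.foldl_append]

theorem pvVisit2_eq (p : List (List (List String))) (m : pvSt) :
    pvVisit2 p m = (m.1, m.2.1, pvUpd m.2.2.1 (p.length : Int),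
      (p.map (fun x => (x.length : Int))).foldl pvUpd m.2.2.2.1,
      (p.flatten.map (fun x => (x.length : Int))).foldl pvUpd m.2.2.2.2) := by
  unfold pvVisit2
  rw [foldl_pvVisit3]

theorem foldl_pvVisit2 (c : List (List (List (List String)))) (m : pvSt) :
    c.foldl (fun a p => pvVisit2 p a) m = (m.1, m.2.1,
      (c.map (fun x => (x.length : Int))).foldl pvUpd m.2.2.1,
      (c.flatten.map (fun x => (x.length : Int))).foldl pvUpd m.2.2.2.1,
      (c.flatten.flatten.map (fun x => (x.length : Int))).foldl pvUpd m.2.2.2.2) := by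
  induction c generalizing m with
  | nil => rfl
  | cons p c ih => rw [List.foldl_cons, ih, pvVisit2_eq]; simp [List.foldl_append]

theorem pvVisit1_eq (c : List (List (List (List String)))) (m : pvSt) :
    pvVisit1 c m = (m.1, pvUpd m.2.1 (c.length : Int),
      (c.map (fun x => (x.length : Int))).foldl pvUpd m.2.2.1,
      (c.flatten.map (fun x => (x.length : Int))).foldl pvUpd m.2.2.2.1,
      (c.flatten.flatten.map (fun x => (x.length : Int))).foldl pvUpd m.2.2.2.2) := by
  unfold pvVisit1
  rw [foldl_pvVisit2]

theorem foldl_pvVisit1 (b : List (List (List (List (List String))))) (m : pvSt) :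
    b.foldl (fun a c => pvVisit1 c a) m = (m.1,
      (b.map (fun x => (x.length : Int))).foldl pvUpd m.2.1,
      (b.flatten.map (fun x => (x.length : Int))).foldl pvUpd m.2.2.1,
      (b.flatten.flatten.map (fun x => (x.length : Int))).foldl pvUpd m.2.2.2.1,
      (b.flatten.flatten.flatten.map (fun x => (x.length : Int))).foldl pvUpd m.2.2.2.2) := by
  induction b generalizing m with
  | nil => rfl
  | cons c b ih => rw [List.foldl_cons, ih, pvVisit1_eq]; simp [List.foldl_append]

theorem pvVisit0_eq (b : List (List (List (List (List String))))) (m : pvSt) :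
    pvVisit0 b m = (pvUpd m.1 (b.length : Int),
      (b.map (fun x => (x.length : Int))).foldl pvUpd m.2.1,
      (b.flatten.map (fun x => (x.length : Int))).foldl pvUpd m.2.2.1,
      (b.flatten.flatten.map (fun x => (x.length : Int))).foldl pvUpd m.2.2.2.1,
      (b.flatten.flatten.flatten.map (fun x => (x.length : Int))).foldl pvUpd m.2.2.2.2) := by
  unfold pvVisit0
  rw [foldl_pvVisit1]

theorem max?_eq_foldl_pvUpd (xs : List Int) (h : xs ≠ []) :
    PySem.List.max? xs (fun y => y) = xs.foldl pvUpd none := by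
  obtain ⟨x, t, rfl⟩ := List.exists_cons_of_ne_nil h
  rw [PySem.List.max?_id_cons, foldl_pvUpd_none]

-- ===== VERDICT (by name: the statement is the Claim_ definition above) =====
theorem max_lengths_spec : Claim_equal_max_lengths := by
  intro book _ hpre
  obtain ⟨h1, h2, h3, h4⟩ := hpre
  unfold Spec_max_lengths max_lengths max_lengths_alt
  dsimp only
  rw [pvVisit0_eq]
  have hm1 : (book.map (fun x => (x.length : Int))) ≠ [] :=
    fun he => h1 (List.map_eq_nil_iff.mp he)
  have hm2 : (book.flatten.map (fun x => (x.length : Int))) ≠ [] :=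
    fun he => h2 (List.map_eq_nil_iff.mp he)
  have hm3 : (book.flatten.flatten.map (fun x => (x.length : Int))) ≠ [] :=
    fun he => h3 (List.map_eq_nil_iff.mp he)
  have hm4 : (book.flatten.flatten.flatten.map (fun x => (x.length : Int))) ≠ [] :=
    fun he => h4 (List.map_eq_nil_iff.mp he)
  rw [max?_eq_foldl_pvUpd _ hm1, max?_eq_foldl_pvUpd _ hm2,
      max?_eq_foldl_pvUpd _ hm3, max?_eq_foldl_pvUpd _ hm4]
  obtain ⟨x1, t1, e1⟩ := List.exists_cons_of_ne_nil hm1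
  obtain ⟨x2, t2, e2⟩ := List.exists_cons_of_ne_nil hm2
  obtain ⟨x3, t3, e3⟩ := List.exists_cons_of_ne_nil hm3
  obtain ⟨x4, t4, e4⟩ := List.exists_cons_of_ne_nil hm4
  simp only [e1, e2, e3, e4, foldl_pvUpd_none]
  simp [pvUpd]
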